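-- pv_equiv track=rewrite | github.com/Abdulmumin1/lmfetch | lmfetch/analyzers/__init__.py | get_related_files
-- ===== SOURCE A (Python) =====
-- def get_related_files(
--     target_files: set[str],
--     graph: dict[str, set[str]],
--     depth: int = 2,
-- ) -> set[str]:
--     """Get files related to target files (imports and importers)."""
--     related = set(target_files)
--
--     # Build reverse graph (what imports what)
--     reverse_graph: dict[str, set[str]] = {path: set() for path in graph}
--     for path, imports in graph.items():
--         for imp in imports:
--             if imp in reverse_graph:
--                 reverse_graph[imp].add(path)
--
--     # BFS to find related files
--     frontier = set(target_files)
--     for _ in range(depth):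
--         next_frontier = set()
--         for path in frontier:
--             # Files this imports
--             next_frontier.update(graph.get(path, set()))
--             # Files that import this
--             next_frontier.update(reverse_graph.get(path, set()))
--         next_frontier -= related
--         related.update(next_frontier)
--         frontier = next_frontier
--         if not frontier:
--             break
--
--     return related
-- ===== SOURCE B (Python) =====
-- def get_related_files(
--     target_files: set[str],
--     graph: dict[str, set[str]],
--     depth: int = 2,
-- ) -> set[str]:
--     """Get files related to target files (imports and importers)."""
--
--     def neighbors(p):
--         if p not in graph:
--             return []
--         return list(graph[p]) + [r for r, imps in graph.items() if p in imps]
--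
--     def expand(related, frontier, budget):
--         if budget <= 0 or not frontier:
--             return related
--         nxt = []
--         for p in frontier:
--             for q in neighbors(p):
--                 if q not in related and q not in nxt:
--                     nxt.append(q)
--         return expand(related | set(nxt), nxt, budget - 1)
--
--     return expand(set(target_files), list(set(target_files)), depth)
-- ===== Notes on version B (the rewrite author's own statement) =====
-- stated objective: simpler
-- what changed: B drops A's precomputed reverse-import dict and per-level set subtraction: a recursive depth-limited expansion uses a neighbors() helper that finds importers by scanning graph.items() on the fly and appends only not-yet-related nodes to the next frontier.
import Mathlib
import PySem

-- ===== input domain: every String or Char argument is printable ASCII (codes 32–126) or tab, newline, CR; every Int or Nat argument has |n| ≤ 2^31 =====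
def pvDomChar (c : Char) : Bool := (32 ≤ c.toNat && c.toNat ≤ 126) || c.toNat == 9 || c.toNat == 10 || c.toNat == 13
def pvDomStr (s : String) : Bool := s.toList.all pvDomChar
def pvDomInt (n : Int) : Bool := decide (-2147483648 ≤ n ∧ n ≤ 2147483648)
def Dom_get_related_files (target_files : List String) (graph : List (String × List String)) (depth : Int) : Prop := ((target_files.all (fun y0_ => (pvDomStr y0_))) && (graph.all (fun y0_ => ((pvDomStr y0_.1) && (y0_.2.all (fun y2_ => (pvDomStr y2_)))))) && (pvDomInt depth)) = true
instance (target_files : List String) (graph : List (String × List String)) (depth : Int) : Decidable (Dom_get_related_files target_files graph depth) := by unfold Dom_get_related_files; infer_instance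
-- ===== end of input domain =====

-- B replaces A's precomputed reverse-import dict and per-level set subtraction by a recursive
-- depth-limited expansion with a `neighbors` helper that finds importers by scanning the graph
-- on the fly (objective: simpler; the return value is a Python set, compared as a set).

-- ===== PORT A =====
-- reverse_graph construction: inner loop 'for imp in imports: if imp in reverse_graph: reverse_graph[imp].add(path)'
def pvA_inner (path : String) (d : PySem.Dict String (PySem.Set String)) (imports : List String) : PySem.Dict String (PySem.Set String) :=
  imports.foldl (fun d imp => if d.contains imp then d.modify imp PySem.Set.empty (fun s => PySem.Set.add s path) else d) d

-- reverse_graph = {path: set() for path in graph}; then the double loop over graph.items()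
def pvA_rev (g : PySem.Dict String (List String)) : PySem.Dict String (PySem.Set String) :=
  g.items.foldl (fun d pi => pvA_inner pi.1 d pi.2)
    (g.keys.foldl (fun d p => d.insert p PySem.Set.empty) PySem.Dict.empty)

-- 'for _ in range(depth): … if not frontier: break'
def pvA_bfs (g : PySem.Dict String (List String)) (rev : PySem.Dict String (PySem.Set String)) :
    Nat → PySem.Set String → PySem.Set String → PySem.Set String
  | 0, related, _ => related
  | n+1, related, frontier =>
      let next_frontier := frontier.foldl
        (fun acc p => PySem.Set.update (PySem.Set.update acc (g.getD p [])) (rev.getD p PySem.Set.empty))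
        PySem.Set.empty
      let nf := PySem.Set.diff next_frontier related
      let related' := PySem.Set.update related nf
      if nf.isEmpty then related' else pvA_bfs g rev n related' nf

def get_related_files (target_files : List String) (graph : List (String × List String)) (depth : Int) : List String :=
  let g := PySem.Dict.ofList graph
  pvA_bfs g (pvA_rev g) depth.toNat (PySem.Set.ofList target_files) (PySem.Set.ofList target_files)

-- ===== PORT B =====
-- def neighbors(p): imports of p plus importers of p found by scanning graph.items()
def pvB_neighbors (g : PySem.Dict String (List String)) (p : String) : List String :=
  if g.contains p then
    g.getD p [] ++ (g.items.filter (fun ri => decide (p ∈ ri.2))).map (·.1)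
  else []

-- def expand(related, frontier, budget): recursive depth-limited expansion
def pvB_expand (g : PySem.Dict String (List String)) (related : PySem.Set String) (frontier : List String) (budget : Int) : PySem.Set String :=
  if budget ≤ 0 ∨ frontier = [] then related
  else
    let nxt := frontier.foldl (fun nxt p =>
      (pvB_neighbors g p).foldl (fun nxt q => if q ∈ related ∨ q ∈ nxt then nxt else nxt ++ [q]) nxt) []
    pvB_expand g (PySem.Set.union related (PySem.Set.ofList nxt)) nxt (budget - 1)
termination_by budget.toNat
decreasing_by omega

def get_related_files_alt (target_files : List String) (graph : List (String × List String)) (depth : Int) : List String :=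
  let g := PySem.Dict.ofList graph
  pvB_expand g (PySem.Set.ofList target_files) (PySem.Set.ofList target_files) depth

-- ===== PRECONDITION & SPEC =====
def Spec_get_related_files (target_files : List String) (graph : List (String × List String)) (depth : Int) (out : List String) : Prop := out = get_related_files_alt target_files graph depth
instance (target_files : List String) (graph : List (String × List String)) (depth : Int) (out : List String) : Decidable (Spec_get_related_files target_files graph depth out) := by unfold Spec_get_related_files; infer_instance

-- ===== CLAIM (what is proved, stated in full; the proofs are below) =====
def Claim_equal_get_related_files : Prop := ∀ (target_files : List String) (graph : List (String × List String)) (depth : Int), Dom_get_related_files target_files graph depth → Spec_get_related_files target_files graph depth (get_related_files target_files graph depth)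

-- ===== LEMMAS AND PROOFS =====

-- contains is invariant through pvA_inner (it only modifies keys already present)
theorem pvA_inner_contains (path : String) (imports : List String) (d : PySem.Dict String (PySem.Set String)) (q : String) :
    (pvA_inner path d imports).contains q = d.contains q := by
  induction imports generalizing d with
  | nil => rfl
  | cons imp rest ih =>
      simp only [pvA_inner, List.foldl_cons] at *
      rw [ih]
      split
      · next h =>
          rw [PySem.Dict.contains_modify]
          by_cases hq : q = imp
          · simp [hq, h]
          · simp [hq]
      · rfl

-- value of pvA_inner at p
theorem pvA_inner_getD (path : String) (imports : List String) (d : PySem.Dict String (PySem.Set String)) (p : String) :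
    (pvA_inner path d imports).getD p PySem.Set.empty =
      if d.contains p ∧ p ∈ imports then PySem.Set.add (d.getD p PySem.Set.empty) path
      else d.getD p PySem.Set.empty := by
  induction imports generalizing d with
  | nil => simp [pvA_inner]
  | cons imp rest ih =>
      simp only [pvA_inner, List.foldl_cons] at *
      by_cases hci : d.contains imp = true
      · simp only [hci, if_true]
        rw [ih]
        rw [PySem.Dict.contains_modify, PySem.Dict.getD_modify]
        by_cases hpi : p = imp
        · subst hpi
          by_cases hpr : p ∈ rest
          · simp [hpr, hci]
          · simp [hpr, hci]
        · by_cases hpr : p ∈ rest <;> by_cases hcp : d.contains p = true <;>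
            simp [hpi, hpr, hcp, List.mem_cons]
      · simp only [hci]
        rw [ih]
        have hni : p ∈ (imp :: rest) ↔ p ∈ rest ∨ p = imp := by
          constructor
          · intro h; rcases List.mem_cons.mp h with h | h
            · exact Or.inr h
            · exact Or.inl h
          · intro h; rcases h with h | h
            · exact List.mem_cons_of_mem _ h
            · exact h ▸ List.mem_cons_self
        by_cases hpi : p = imp
        · subst hpi
          have : ¬ d.contains p = true := hci
          simp [this]
        · by_cases hpr : p ∈ rest <;> simp [hpi, hpr, List.mem_cons]

-- value at p after filling the reverse graph over the item list L
theorem pvA_fold_getD (L : List (String × List String)) (d : PySem.Dict String (PySem.Set String)) (p : String) :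
    (L.foldl (fun d pi => pvA_inner pi.1 d pi.2) d).getD p PySem.Set.empty =
      if d.contains p
      then PySem.Set.update (d.getD p PySem.Set.empty) ((L.filter (fun ri => decide (p ∈ ri.2))).map (·.1))
      else d.getD p PySem.Set.empty := by
  induction L generalizing d with
  | nil => by_cases h : d.contains p = true <;> simp [h, PySem.Set.update]
  | cons pi rest ih =>
      rw [List.foldl_cons, ih, pvA_inner_contains, pvA_inner_getD]
      by_cases hc : d.contains p = true
      · by_cases hm : p ∈ pi.2 <;>
          simp [hc, hm, PySem.Set.update_cons]
      · simp [hc]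

-- the comprehension-initialised dict {path: set() for path in keys}: every value is the empty set
theorem pv_init_getD (L : List String) (d : PySem.Dict String (PySem.Set String)) (p : String)
    (hd : d.getD p PySem.Set.empty = PySem.Set.empty) :
    (L.foldl (fun d x => d.insert x PySem.Set.empty) d).getD p PySem.Set.empty = PySem.Set.empty := by
  induction L generalizing d with
  | nil => exact hd
  | cons x rest ih =>
      rw [List.foldl_cons]
      apply ih
      rw [PySem.Dict.getD_insert]
      split <;> [rfl; exact hd]

theorem pv_init_contains (L : List String) (d : PySem.Dict String (PySem.Set String)) (p : String) :
    (L.foldl (fun d x => d.insert x PySem.Set.empty) d).contains p = (d.contains p || p ∈ L) := by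
  induction L generalizing d with
  | nil => simp
  | cons x rest ih =>
      rw [List.foldl_cons, ih, PySem.Dict.contains_insert]
      by_cases h : p = x
      · simp [h, List.mem_cons]
      · have hb : (p == x) = false := by simp [h]
        simp [hb, h, List.mem_cons]

-- characterisation of A's reverse graph: its value at p is exactly B's on-the-fly importer list
theorem pvA_rev_getD (g : PySem.Dict String (List String)) (hk : g.keys.Nodup) (p : String) :
    (pvA_rev g).getD p PySem.Set.empty =
      if g.contains p then ((g.items.filter (fun ri => decide (p ∈ ri.2))).map (·.1)) else [] := by
  unfold pvA_rev
  rw [pvA_fold_getD, pv_init_contains, pv_init_getD _ _ _ (by rfl)]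
  rw [PySem.Dict.contains_empty]
  by_cases hc : g.contains p = true
  · have hmem : p ∈ g.keys := (PySem.Dict.contains_iff_mem_keys g p).mp hc
    simp only [hmem, Bool.false_or, decide_true, if_true, hc]
    have hsub : ((g.items.filter (fun ri => decide (p ∈ ri.2))).map (·.1)).Sublist g.keys := by
      have : (g.items.filter (fun ri => decide (p ∈ ri.2))).Sublist g.items := List.filter_sublist
      simpa [PySem.Dict.keys] using this.map (·.1)
    have hnd : ((g.items.filter (fun ri => decide (p ∈ ri.2))).map (·.1)).Nodup := hk.sublist hsub
    calc PySem.Set.update PySem.Set.empty ((g.items.filter (fun ri => decide (p ∈ ri.2))).map (·.1))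
        = PySem.Set.ofList ((g.items.filter (fun ri => decide (p ∈ ri.2))).map (·.1)) := rfl
      _ = _ := PySem.Set.ofList_eq_self_of_nodup _ hnd
  · have hmem : ¬ p ∈ g.keys := fun h => hc ((PySem.Dict.contains_iff_mem_keys g p).mpr h)
    simp [hmem, hc]

-- one conditional append step of B equals one add-then-subtract step of A
theorem pv_diff_add (s R : PySem.Set String) (q : String) :
    PySem.Set.diff (PySem.Set.add s q) R =
      (if q ∈ R ∨ q ∈ PySem.Set.diff s R then PySem.Set.diff s R else PySem.Set.diff s R ++ [q]) := by
  by_cases hs : q ∈ s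
  · rw [PySem.Set.add_of_mem hs]
    by_cases hr : q ∈ R
    · simp [hr]
    · have hd : q ∈ PySem.Set.diff s R := (PySem.Set.mem_diff s R q).mpr ⟨hs, hr⟩
      simp [hd]
  · rw [PySem.Set.add_of_not_mem hs]
    unfold PySem.Set.diff
    rw [List.filter_append]
    by_cases hr : q ∈ R
    · have hc : PySem.Set.contains R q = true := (PySem.Set.contains_iff R q).mpr hr
      simp [hr, hs]
    · simp [hr, hs]

-- B's inner filtered-append loop computes A's 'build then subtract related'
theorem pv_diff_update (l : List String) (s R : PySem.Set String) :
    PySem.Set.diff (PySem.Set.update s l) R =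
      l.foldl (fun nxt q => if q ∈ R ∨ q ∈ nxt then nxt else nxt ++ [q]) (PySem.Set.diff s R) := by
  induction l generalizing s with
  | nil => rfl
  | cons q rest ih => rw [PySem.Set.update_cons, List.foldl_cons, ih, pv_diff_add]

-- one whole BFS level: A's frontier expansion minus related = B's nxt accumulation
theorem pv_level_eq (g : PySem.Dict String (List String)) (hk : g.keys.Nodup)
    (F : List String) (s R : PySem.Set String) :
    PySem.Set.diff
      (F.foldl (fun acc p => PySem.Set.update (PySem.Set.update acc (g.getD p []))
          ((pvA_rev g).getD p PySem.Set.empty)) s) R =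
      F.foldl (fun nxt p =>
        (pvB_neighbors g p).foldl (fun nxt q => if q ∈ R ∨ q ∈ nxt then nxt else nxt ++ [q]) nxt)
        (PySem.Set.diff s R) := by
  induction F generalizing s with
  | nil => rfl
  | cons p rest ih =>
      rw [List.foldl_cons, List.foldl_cons, ih, ← pv_diff_update]
      congr 1
      rw [← PySem.Set.update_append, pvA_rev_getD g hk]
      unfold pvB_neighbors
      by_cases hc : g.contains p = true
      · simp [hc]
      · simp [hc, PySem.Dict.getD_of_not_contains g [] (Bool.not_eq_true (g.contains p) ▸ hc)]

-- the diff of a set is Nodup, so B's set(nxt) is nxt itself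
theorem pv_diff_nodup (s R : PySem.Set String) (h : List.Nodup s) : (PySem.Set.diff s R).Nodup :=
  h.filter _

-- A's frontier-expansion fold keeps the accumulator duplicate-free
theorem pvA_fold_nodup (g : PySem.Dict String (List String)) (F : List String)
    (s : PySem.Set String) (hs : List.Nodup s) :
    List.Nodup (F.foldl (fun acc p => PySem.Set.update (PySem.Set.update acc (g.getD p []))
        ((pvA_rev g).getD p PySem.Set.empty)) s) := by
  induction F generalizing s with
  | nil => exact hs
  | cons p rest ih =>
      rw [List.foldl_cons]
      exact ih _ (PySem.Set.nodup_update _ _ (PySem.Set.nodup_update _ _ hs))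

-- the two loops agree level by level
theorem pv_loop_eq (g : PySem.Dict String (List String)) (hk : g.keys.Nodup) :
    ∀ (n : Nat) (b : Int), b.toNat = n → ∀ (R F : PySem.Set String),
      pvA_bfs g (pvA_rev g) n R F = pvB_expand g R F b := by
  intro n
  induction n with
  | zero =>
      intro b hb R F
      rw [pvB_expand, if_pos (Or.inl (by omega))]
      rfl
  | succ n ih =>
      intro b hb R F
      have hb0 : 0 < b := by omega
      rw [pvB_expand]
      by_cases hF : F = []
      · subst hF
        rw [if_pos (Or.inr rfl)]
        rfl
      · rw [if_neg (by simp only [hF, or_false]; omega)]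
        have hnxt : F.foldl (fun nxt p =>
              (pvB_neighbors g p).foldl (fun nxt q => if q ∈ R ∨ q ∈ nxt then nxt else nxt ++ [q]) nxt) [] =
            PySem.Set.diff (F.foldl (fun acc p => PySem.Set.update (PySem.Set.update acc (g.getD p []))
              ((pvA_rev g).getD p PySem.Set.empty)) PySem.Set.empty) R := by
          simpa [PySem.Set.diff, PySem.Set.empty] using (pv_level_eq g hk F PySem.Set.empty R).symm
        rw [hnxt]
        have hnd : List.Nodup (PySem.Set.diff (F.foldl (fun acc p =>
            PySem.Set.update (PySem.Set.update acc (g.getD p []))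
              ((pvA_rev g).getD p PySem.Set.empty)) PySem.Set.empty) R) :=
          pv_diff_nodup _ _ (pvA_fold_nodup g F PySem.Set.empty List.nodup_nil)
        set nf := PySem.Set.diff (F.foldl (fun acc p =>
            PySem.Set.update (PySem.Set.update acc (g.getD p []))
              ((pvA_rev g).getD p PySem.Set.empty)) PySem.Set.empty) R with hnf
        have hof : PySem.Set.ofList nf = nf := PySem.Set.ofList_eq_self_of_nodup _ hnd
        show pvA_bfs g (pvA_rev g) (n+1) R F = _
        rw [pvA_bfs]
        simp only [← hnf]
        rw [PySem.Set.union, hof]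
        by_cases he : nf = []
        · rw [if_pos (by simp [he]), he, pvB_expand, if_pos (Or.inr rfl)]
        · rw [if_neg (by simp [he])]
          exact ih (b - 1) (by omega) _ _

-- ===== VERDICT (by name: the statement is the Claim_ definition above) =====
theorem get_related_files_spec : Claim_equal_get_related_files := by
  intro target_files graph depth _
  unfold Spec_get_related_files get_related_files get_related_files_alt
  exact pv_loop_eq _ (PySem.Dict.nodup_keys_ofList graph) _ depth rfl _ _
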